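-- pv_equiv track=rewrite | github.com/AyerElysia/Strange-Loop-Chatter | life_engine/core/chatter.py | _extract_leading_json_array
-- ===== SOURCE A (Python) =====
-- def _extract_leading_json_array(text: str) -> str | None:
--     if not text.startswith("["):
--         return None
--     depth = 0
--     in_string = False
--     escaped = False
--     for index, char in enumerate(text):
--         if in_string:
--             if escaped:
--                 escaped = False
--                 continue
--             if char == "\\":
--                 escaped = True
--                 continue
--             if char == '"':
--                 in_string = False
--             continue
--         if char == '"':
--             in_string = True
--             continue
--         if char == "[":
--             depth += 1
--             continue
--         if char == "]":
--             depth -= 1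
--             if depth == 0:
--                 return text[: index + 1]
--     return None
-- ===== SOURCE B (Python) =====
-- def _extract_leading_json_array(text: str) -> str | None:
--     if not text.startswith("["):
--         return None
--     depth = 0
--     offset = 0
--     inside = False
--     for seg in text.split('"'):
--         if inside:
--             # the quote ending this segment closes the string literal
--             # unless the segment ends with an odd run of backslashes
--             run = 0
--             while run < len(seg) and seg[len(seg) - 1 - run] == "\\":
--                 run += 1
--             if run % 2 == 0:
--                 inside = False
--         else:
--             for pos, ch in enumerate(seg):
--                 if ch == "[":
--                     depth += 1
--                 elif ch == "]":
--                     depth -= 1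
--                     if depth == 0:
--                         return text[: offset + pos + 1]
--             inside = True
--         offset += len(seg) + 1
--     return None
-- ===== Notes on version B (the rewrite author's own statement) =====
-- stated objective: alternative
-- what changed: Replaced the single per-character scan with persistent in_string/escaped flags by a staged decomposition: split the text on the double-quote character, decide for each in-string segment whether its terminating quote is escaped via trailing-backslash-run parity, and run the bracket-depth scan only over the outside segments.
import Mathlib
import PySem

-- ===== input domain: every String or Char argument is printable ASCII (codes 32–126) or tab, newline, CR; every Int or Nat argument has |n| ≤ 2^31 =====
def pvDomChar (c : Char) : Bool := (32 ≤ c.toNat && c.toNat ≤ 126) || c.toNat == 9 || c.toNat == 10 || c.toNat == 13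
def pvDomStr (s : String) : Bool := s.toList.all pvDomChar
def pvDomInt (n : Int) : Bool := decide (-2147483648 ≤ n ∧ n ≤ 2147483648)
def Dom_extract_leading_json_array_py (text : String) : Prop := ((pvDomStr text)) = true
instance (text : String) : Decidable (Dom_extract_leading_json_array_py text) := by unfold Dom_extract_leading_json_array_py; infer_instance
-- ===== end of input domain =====

-- B replaces A's single per-character flag machine by a staged decomposition: split the text
-- on '"', classify each in-string segment by its trailing-backslash parity, and scan brackets
-- only in the outside segments (alternative decomposition, same O(n) cost).

-- ===== PORT A =====
-- A's for-loop: state (depth, in_string, escaped), index i into the full text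
def pvGoA (full : List Char) (i : Nat) (depth : Int) (inStr esc : Bool) : List Char → Option String
  | [] => none
  | c :: rest =>
    if inStr then
      if esc then pvGoA full (i+1) depth true false rest
      else if c = '\\' then pvGoA full (i+1) depth true true rest
      else if c = '"' then pvGoA full (i+1) depth false false rest
      else pvGoA full (i+1) depth true false rest
    else if c = '"' then pvGoA full (i+1) depth true false rest
    else if c = '[' then pvGoA full (i+1) (depth+1) false false rest
    else if c = ']' then
      if depth - 1 = 0 then some (String.ofList (full.take (i+1)))
      else pvGoA full (i+1) (depth-1) false false rest
    else pvGoA full (i+1) depth false false rest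

def extract_leading_json_array_py (text : String) : Option String :=
  if PySem.Str.startswith text "[" then pvGoA text.toList 0 0 false false text.toList
  else none

-- ===== PORT B =====
-- Source B's inner while loop: the run of backslashes at the end of a segment (walks from the end,
-- i.e. over the reversed segment)
def pvTrailRun : List Char → Nat
  | [] => 0
  | c :: rest => if c = '\\' then pvTrailRun rest + 1 else 0

-- Source B's `for pos, ch in enumerate(seg)` over an outside segment: i is the absolute index;
-- .inl = the early `return` index, .inr = the depth after the segment
def pvScanSeg : List Char → Nat → Int → Nat ⊕ Int
  | [], _, d => .inr d
  | c :: rest, i, d =>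
    if c = '[' then pvScanSeg rest (i+1) (d+1)
    else if c = ']' then
      if d - 1 = 0 then .inl i
      else pvScanSeg rest (i+1) (d-1)
    else pvScanSeg rest (i+1) d

-- Source B's `for seg in text.split('"')` with state (offset, depth, inside)
def pvLoopB (full : List Char) : List (List Char) → Nat → Int → Bool → Option String
  | [], _, _, _ => none
  | seg :: rest, offset, depth, inside =>
    if inside then
      if pvTrailRun seg.reverse % 2 = 0 then
        pvLoopB full rest (offset + seg.length + 1) depth false
      else
        pvLoopB full rest (offset + seg.length + 1) depth true
    else
      match pvScanSeg seg offset depth with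
      | .inl idx => some (String.ofList (full.take (idx + 1)))
      | .inr d => pvLoopB full rest (offset + seg.length + 1) d true

def extract_leading_json_array_py_alt (text : String) : Option String :=
  if PySem.Str.startswith text "[" then
    pvLoopB text.toList (PySem.Chars.splitOn text.toList ['"']) 0 0 false
  else none

-- ===== PRECONDITION & SPEC =====
def Spec_extract_leading_json_array_py (text : String) (out : Option String) : Prop := out = extract_leading_json_array_py_alt text
instance (text : String) (out : Option String) : Decidable (Spec_extract_leading_json_array_py text out) := by unfold Spec_extract_leading_json_array_py; infer_instance

-- ===== CLAIM (what is proved, stated in full; the proofs are below) =====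
def Claim_equal_extract_leading_json_array_py : Prop := ∀ (text : String), Dom_extract_leading_json_array_py text → Spec_extract_leading_json_array_py text (extract_leading_json_array_py text)

-- ===== LEMMAS AND PROOFS =====

-- structural model of text.split('"')
def pvSplit : List Char → List (List Char)
  | [] => [[]]
  | c :: rest => if c = '"' then [] :: pvSplit rest else (pvSplit rest).modifyHead (c :: ·)

def pvJoin : List (List Char) → List Char
  | [] => []
  | [s] => s
  | s :: ss => s ++ '"' :: pvJoin ss

theorem pvGoA_cons (full : List Char) (i : Nat) (d : Int) (s e : Bool) (c : Char) (rest : List Char) :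
    pvGoA full i d s e (c :: rest) =
      (if s then
        if e then pvGoA full (i+1) d true false rest
        else if c = '\\' then pvGoA full (i+1) d true true rest
        else if c = '"' then pvGoA full (i+1) d false false rest
        else pvGoA full (i+1) d true false rest
      else if c = '"' then pvGoA full (i+1) d true false rest
      else if c = '[' then pvGoA full (i+1) (d+1) false false rest
      else if c = ']' then
        if d - 1 = 0 then some (String.ofList (full.take (i+1)))
        else pvGoA full (i+1) (d-1) false false rest
      else pvGoA full (i+1) d false false rest) := by
  rw [pvGoA.eq_def]

theorem pvSplit_ne_nil (l : List Char) : pvSplit l ≠ [] := by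
  cases l with
  | nil => simp [pvSplit]
  | cons c rest =>
    simp only [pvSplit]
    split
    · simp
    · intro h
      have := pvSplit_ne_nil rest
      cases hs : pvSplit rest with
      | nil => exact this hs
      | cons a as => rw [hs] at h; simp at h

theorem pvJoin_pvSplit (l : List Char) : pvJoin (pvSplit l) = l := by
  induction l with
  | nil => simp [pvSplit, pvJoin]
  | cons c rest ih =>
    simp only [pvSplit]
    by_cases hc : c = '"'
    · subst hc
      cases hs : pvSplit rest with
      | nil => exact absurd hs (pvSplit_ne_nil rest)
      | cons a as =>
        rw [hs] at ih
        simp [pvJoin, ← ih]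
    · rw [if_neg hc]
      cases hs : pvSplit rest with
      | nil => exact absurd hs (pvSplit_ne_nil rest)
      | cons a as =>
        rw [hs] at ih
        cases as with
        | nil => simpa [pvJoin] using ih
        | cons b bs => simpa [pvJoin] using ih

theorem pvSplit_no_quote (l : List Char) : ∀ s ∈ pvSplit l, '"' ∉ s := by
  induction l with
  | nil => simp [pvSplit]
  | cons c rest ih =>
    simp only [pvSplit]
    by_cases hc : c = '"'
    · subst hc
      intro s hmem
      rcases List.mem_cons.mp hmem with h | h
      · simp [h]
      · exact ih s h
    · rw [if_neg hc]
      cases hsp : pvSplit rest with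
      | nil => exact absurd hsp (pvSplit_ne_nil rest)
      | cons a as =>
        intro s hmem
        rw [hsp] at ih
        simp only [List.modifyHead] at hmem
        rcases List.mem_cons.mp hmem with h | h
        · subst h
          intro hin
          rcases List.mem_cons.mp hin with h2 | h2
          · exact hc h2.symm
          · exact ih a (by simp) h2
        · exact ih s (by simp [h])

-- splitOn with a one-char separator computes pvSplit
theorem pvSplitOn_go (fuel : Nat) : ∀ (l : List Char), l.length < fuel → ∀ (cur : List Char) (acc : List (List Char)),
    PySem.Chars.splitOn.go ['"'] fuel l cur acc = acc.reverse ++ (pvSplit l).modifyHead (cur.reverse ++ ·) := by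
  induction fuel with
  | zero => intro l hl; exact absurd hl (by omega)
  | succ n ih =>
    intro l hl cur acc
    cases l with
    | nil =>
      rw [PySem.Chars.splitOn.go] <;> simp [pvSplit]
    | cons c rest =>
      rw [PySem.Chars.splitOn.go]
      by_cases hc : c = '"'
      · subst hc
        rw [if_pos (by simp)]
        simp only [List.length_cons] at hl
        simp only [List.length_cons, List.length_nil, List.drop_succ_cons, List.drop_zero]
        rw [ih rest (by omega) [] (cur.reverse :: acc)]
        simp only [pvSplit]
        cases hsp : pvSplit rest with
        | nil => exact absurd hsp (pvSplit_ne_nil rest)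
        | cons a as => simp
      · rw [if_neg (by simp [List.isPrefixOf]; exact fun h => hc h.symm)]
        simp only [List.length_cons] at hl
        rw [ih rest (by omega) (c :: cur) acc]
        simp only [pvSplit, if_neg hc]
        cases hs : pvSplit rest with
        | nil => exact absurd hs (pvSplit_ne_nil rest)
        | cons a as => simp

theorem pvSplitOn_eq (l : List Char) : PySem.Chars.splitOn l ['"'] = pvSplit l := by
  have h := pvSplitOn_go (l.length + 1) l (by omega) [] []
  rw [PySem.Chars.splitOn, h]
  cases hsp : pvSplit l with
  | nil => exact absurd hsp (pvSplit_ne_nil l)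
  | cons a as => simp

-- A's escaped flag after running a quote-free segment = trailing-backslash-run parity
theorem pvEsc_eq_parity (seg : List Char) :
    seg.foldl (fun e c => if e then false else decide (c = '\\')) false
      = decide (pvTrailRun seg.reverse % 2 = 1) := by
  induction seg using List.reverseRecOn with
  | nil => simp [pvTrailRun]
  | append_singleton xs c ih =>
    rw [List.foldl_append, List.foldl_cons, List.foldl_nil, ih]
    rw [List.reverse_append, List.reverse_singleton, List.singleton_append]
    simp only [pvTrailRun]
    by_cases hc : c = '\\'
    · subst hc
      by_cases hp : pvTrailRun xs.reverse % 2 = 1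
      · have h2 : ¬ ((pvTrailRun xs.reverse + 1) % 2 = 1) := by omega
        simp [hp, h2]
      · have h2 : (pvTrailRun xs.reverse + 1) % 2 = 1 := by omega
        simp [hp, h2]
    · by_cases hp : pvTrailRun xs.reverse % 2 = 1 <;> simp [hp, hc]

-- A inside a string literal over a quote-free segment: only the escaped flag evolves
theorem pvGoA_inStr_seg (full : List Char) (seg : List Char) (hq : '"' ∉ seg) :
    ∀ (tail : List Char) (i : Nat) (d : Int) (e : Bool),
      pvGoA full i d true e (seg ++ tail) =
        pvGoA full (i + seg.length) d true (seg.foldl (fun e c => if e then false else decide (c = '\\')) e) tail := by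
  induction seg with
  | nil => intro tail i d e; simp
  | cons c rest ih =>
    intro tail i d e
    have hq' : '"' ∉ rest := fun h => hq (by simp [h])
    have hcq : c ≠ '"' := fun h => hq (by simp [h])
    rw [List.cons_append, pvGoA_cons]
    cases e with
    | true =>
      rw [ih hq' tail (i+1) d false]
      simp only [List.foldl_cons, List.length_cons]
      norm_num
      ring_nf
    | false =>
      simp only [Bool.false_eq_true, if_false]
      by_cases hb : c = '\\'
      · rw [if_pos hb, ih hq' tail (i+1) d true]
        simp only [List.foldl_cons, List.length_cons]
        norm_num [hb]
        ring_nf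
      · rw [if_neg hb, if_neg hcq, ih hq' tail (i+1) d false]
        simp only [List.foldl_cons, List.length_cons]
        norm_num [hb]
        ring_nf

-- A outside a string over a quote-free segment computes B's segment scan
theorem pvGoA_out_seg (full : List Char) (seg : List Char) (hq : '"' ∉ seg) :
    ∀ (tail : List Char) (i : Nat) (d : Int),
      pvGoA full i d false false (seg ++ tail) =
        (match pvScanSeg seg i d with
         | .inl idx => some (String.ofList (full.take (idx + 1)))
         | .inr d' => pvGoA full (i + seg.length) d' false false tail) := by
  induction seg with
  | nil => intro tail i d; simp [pvScanSeg]
  | cons c rest ih =>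
    intro tail i d
    have hq' : '"' ∉ rest := fun h => hq (by simp [h])
    have hcq : c ≠ '"' := fun h => hq (by simp [h])
    rw [List.cons_append, pvGoA_cons]
    simp only [Bool.false_eq_true, if_false, if_neg hcq]
    simp only [pvScanSeg]
    by_cases hb : c = '['
    · rw [if_pos hb, if_pos hb, ih hq' tail (i+1) (d+1)]
      simp only [List.length_cons]
      ring_nf
    · rw [if_neg hb, if_neg hb]
      by_cases hc : c = ']'
      · rw [if_pos hc, if_pos hc]
        by_cases hd : d - 1 = 0
        · simp [hd]
        · rw [if_neg hd, if_neg hd, ih hq' tail (i+1) (d-1)]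
          simp only [List.length_cons]
          ring_nf
      · rw [if_neg hc, if_neg hc, ih hq' tail (i+1) d]
        simp only [List.length_cons]
        ring_nf

-- main loop correspondence over the segment list
theorem pvMain (full : List Char) : ∀ (segs : List (List Char)), (∀ s ∈ segs, '"' ∉ s) →
    ∀ (i : Nat) (d : Int) (ins : Bool),
      pvGoA full i d ins false (pvJoin segs) = pvLoopB full segs i d ins := by
  intro segs
  induction segs with
  | nil =>
    intro _ i d ins
    cases ins <;> simp [pvJoin, pvGoA, pvLoopB]
  | cons seg rest ih =>
    intro hq i d ins
    have hseg : '"' ∉ seg := hq seg (by simp)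
    have hrest : ∀ s ∈ rest, '"' ∉ s := fun s hs => hq s (by simp [hs])
    cases rest with
    | nil =>
      have hjoin : pvJoin [seg] = seg ++ [] := by simp [pvJoin]
      cases ins with
      | false =>
        rw [hjoin, pvGoA_out_seg full seg hseg]
        cases hscan : pvScanSeg seg i d <;> simp [pvLoopB, pvGoA, hscan]
      | true =>
        rw [hjoin, pvGoA_inStr_seg full seg hseg]
        by_cases hp : pvTrailRun seg.reverse % 2 = 0 <;> simp [pvLoopB, hp, pvGoA]
    | cons r rs =>
      have hjoin : pvJoin (seg :: r :: rs) = seg ++ '"' :: pvJoin (r :: rs) := by simp [pvJoin]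
      cases ins with
      | false =>
        rw [hjoin, pvGoA_out_seg full seg hseg]
        cases hscan : pvScanSeg seg i d with
        | inl idx => simp [pvLoopB, hscan]
        | inr d' =>
          simp only [pvLoopB, hscan]
          rw [pvGoA_cons]
          simp only [Bool.false_eq_true, if_false]
          exact ih hrest (i + seg.length + 1) d' true
      | true =>
        rw [hjoin, pvGoA_inStr_seg full seg hseg, pvEsc_eq_parity]
        simp only [pvLoopB]
        by_cases hp : pvTrailRun seg.reverse % 2 = 0
        · have h1 : ¬ (pvTrailRun seg.reverse % 2 = 1) := by omega
          rw [if_pos hp]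
          simp only [h1, decide_false]
          rw [pvGoA_cons]
          simp only [Bool.false_eq_true, if_false]
          exact ih hrest (i + seg.length + 1) d false
        · have h1 : pvTrailRun seg.reverse % 2 = 1 := by omega
          rw [if_neg hp]
          simp only [h1, decide_true]
          rw [pvGoA_cons]
          exact ih hrest (i + seg.length + 1) d true

-- ===== VERDICT (by name: the statement is the Claim_ definition above) =====
theorem extract_leading_json_array_py_spec : Claim_equal_extract_leading_json_array_py := by
  intro text _
  unfold Spec_extract_leading_json_array_py extract_leading_json_array_py extract_leading_json_array_py_alt
  by_cases hs : PySem.Str.startswith text "[" = true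
  · rw [if_pos hs, if_pos hs, pvSplitOn_eq]
    have := pvMain text.toList (pvSplit text.toList) (pvSplit_no_quote text.toList) 0 0 false
    rw [pvJoin_pvSplit] at this
    exact this
  · rw [if_neg hs, if_neg hs]
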